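-- pv_equiv track=rewrite | github.com/VerumHades/WatchML | scripts/processing/cleanup.py | extract_selected_specs
-- ===== SOURCE A (Python) =====
-- def clean_to_single_line(value, max_length=100):
--     """
--     Truncates text to the first line and enforces a character limit.
--     """
--     if not value:
--         return None
--
--     # Keep only the first line of text
--     first_line = str(value).split('\n')[0].strip()
--
--     if len(first_line) > max_length:
--         return first_line[:max_length-3] + "..."
--
--     return first_line
--
-- def parse_line_to_pair(line):
--     """
--     Splits a line into a key and value, cleaning surrounding whitespace.
--     """
--     if ":" not in line:
--         return None, None
--
--     key, value = line.split(":", 1)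
--     return key.strip(), value.strip()
--
-- def extract_selected_specs(record, target_keys):
--     """
--     Filters the raw row list for specific key-value pairs and cleans them.
--     """
--     raw_lines = record.get("specifications") or record.get("data") or []
--     specifications = {key: None for key in target_keys}
--
--     for line in raw_lines:
--         key, value = parse_line_to_pair(line)
--
--         if key in target_keys:
--             specifications[key] = clean_to_single_line(value)
--
--     return specifications
-- ===== SOURCE B (Python) =====
-- def extract_selected_specs(record, target_keys):
--     """
--     For each target key independently, scan the lines backwards and take the
--     first (i.e. last-in-file) line whose stripped key matches, then clean it.
--     """
--     raw_lines = []
--     for src in ("specifications", "data"):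
--         if record.get(src):
--             raw_lines = record[src]
--             break
--
--     def last_value(key):
--         for line in reversed(raw_lines):
--             if ":" in line:
--                 k, v = line.split(":", 1)
--                 if k.strip() == key:
--                     return v.strip()
--         return None
--
--     def clean(v):
--         if not v:
--             return None
--         first_line = v.split('\n')[0].strip()
--         if len(first_line) > 100:
--             return first_line[:97] + "..."
--         return first_line
--
--     return {key: clean(last_value(key)) for key in target_keys}
-- ===== Notes on version B (the rewrite author's own statement) =====
-- stated objective: alternative
-- what changed: B inverts the iteration: instead of pre-seeding a dict with all target keys and folding over the lines with a membership test and overwrites, it iterates over the target keys and for each one scans the lines backwards for the last matching line (reversed-scan first match = last-occurrence-wins), cleaning that value.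
import Mathlib
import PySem

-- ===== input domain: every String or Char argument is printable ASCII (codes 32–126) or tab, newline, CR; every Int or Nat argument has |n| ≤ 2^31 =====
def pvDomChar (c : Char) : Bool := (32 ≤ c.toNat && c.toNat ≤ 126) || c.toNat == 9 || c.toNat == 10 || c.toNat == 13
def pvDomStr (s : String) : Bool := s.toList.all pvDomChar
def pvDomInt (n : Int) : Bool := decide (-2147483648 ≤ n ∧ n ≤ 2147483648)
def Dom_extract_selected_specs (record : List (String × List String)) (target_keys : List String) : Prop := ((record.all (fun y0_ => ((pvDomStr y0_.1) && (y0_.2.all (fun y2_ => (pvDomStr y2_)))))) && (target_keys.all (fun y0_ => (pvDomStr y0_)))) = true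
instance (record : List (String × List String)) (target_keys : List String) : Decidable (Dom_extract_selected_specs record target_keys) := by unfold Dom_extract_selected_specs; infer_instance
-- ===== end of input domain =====

-- B inverts the iteration: instead of folding every line into a pre-seeded dict with a
-- membership test, it scans the lines backwards per target key for the last matching line.

-- ===== PORT A =====
-- clean_to_single_line(value, max_length): value is an Optional[str] at A's call site
def clean_to_single_line (value : Option String) (max_length : Int) : Option String :=
  match value with
  | none => none
  | some s =>
    if s = "" then none
    else
      let first_line := PySem.Str.strip ((((PySem.Str.split? s "\n").getD []).headD ""))
      if max_length < PySem.Str.len first_line then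
        some ((PySem.Str.slice first_line none (some (max_length - 3))) ++ "...")
      else some first_line

def parse_line_to_pair (line : String) : Option String × Option String :=
  if PySem.Str.isIn ":" line = false then (none, none)
  else
    match (PySem.Str.splitMax? line ":" 1).getD [] with
    | [k, v] => (some (PySem.Str.strip k), some (PySem.Str.strip v))
    | _ => (none, none)   -- unreachable: split(":", 1) with ":" in line yields 2 parts

-- record.get("specifications") or record.get("data") or []
def rawLines_A (record : List (String × List String)) : List String :=
  match (PySem.Dict.ofList record).get? "specifications" with
  | some l => if l ≠ [] then l else
      (match (PySem.Dict.ofList record).get? "data" with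
       | some l' => if l' ≠ [] then l' else []
       | none => [])
  | none =>
      (match (PySem.Dict.ofList record).get? "data" with
       | some l' => if l' ≠ [] then l' else []
       | none => [])

-- body of A's for-loop
def specStep_A (target_keys : List String) (d : PySem.Dict String (Option String)) (line : String) : PySem.Dict String (Option String) :=
  let kv := parse_line_to_pair line
  match kv.1 with
  | some key => if target_keys.contains key then d.insert key (clean_to_single_line kv.2 100) else d
  | none => d   -- `None in target_keys` is False: target_keys holds strings

def extract_selected_specs (record : List (String × List String)) (target_keys : List String) : List (String × Option String) :=
  let raw_lines := rawLines_A record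
  let specifications : PySem.Dict String (Option String) :=
    target_keys.foldl (fun d key => d.insert key none) PySem.Dict.empty
  let final := raw_lines.foldl (specStep_A target_keys) specifications
  final.items

-- ===== PORT B =====
-- the for/break loop over ("specifications", "data"): first source with a truthy value
def rawLines_B (record : List (String × List String)) : List String :=
  (["specifications", "data"].findSome? (fun src =>
    match (PySem.Dict.ofList record).get? src with
    | some l => if l = [] then none else some l
    | none => none)).getD []

-- body of last_value's loop on one line: a match returns, otherwise keep scanning
def matchLine_B (key : String) (line : String) : Option String :=
  if PySem.Str.isIn ":" line then
    match (PySem.Str.splitMax? line ":" 1).getD [] with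
    | [k, v] => if PySem.Str.strip k = key then some (PySem.Str.strip v) else none
    | _ => none   -- unreachable
  else none

-- last_value(key): scan the (already reversed) lines for the first match
def lastValue_B (key : String) : List String → Option String
  | [] => none
  | line :: rest =>
    match matchLine_B key line with
    | some v => some v
    | none => lastValue_B key rest

def clean_B (v : Option String) : Option String :=
  match v with
  | none => none
  | some s =>
    if s = "" then none
    else
      let first_line := PySem.Str.strip ((((PySem.Str.split? s "\n").getD []).headD ""))
      if 100 < PySem.Str.len first_line then
        some ((PySem.Str.slice first_line none (some 97)) ++ "...")
      else some first_line

def extract_selected_specs_alt (record : List (String × List String)) (target_keys : List String) : List (String × Option String) :=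
  let raw_lines := rawLines_B record
  (PySem.List.dedup target_keys).map
    (fun key => (key, clean_B (lastValue_B key raw_lines.reverse)))

-- ===== PRECONDITION & SPEC =====
def Spec_extract_selected_specs (record : List (String × List String)) (target_keys : List String) (out : List (String × Option String)) : Prop := out = extract_selected_specs_alt record target_keys
instance (record : List (String × List String)) (target_keys : List String) (out : List (String × Option String)) : Decidable (Spec_extract_selected_specs record target_keys out) := by unfold Spec_extract_selected_specs; infer_instance

-- ===== CLAIM (what is proved, stated in full; the proofs are below) =====
def Claim_equal_extract_selected_specs : Prop := ∀ (record : List (String × List String)) (target_keys : List String), Dom_extract_selected_specs record target_keys → Spec_extract_selected_specs record target_keys (extract_selected_specs record target_keys)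

-- ===== LEMMAS AND PROOFS =====

-- both programs pick the same raw line list
theorem raw_eq (record : List (String × List String)) : rawLines_A record = rawLines_B record := by
  unfold rawLines_A rawLines_B
  cases h1 : (PySem.Dict.ofList record).get? "specifications" <;>
  cases h2 : (PySem.Dict.ofList record).get? "data" <;>
    simp [List.findSome?, h1, h2] <;> split <;> simp_all <;> split <;> simp_all

-- the two cleaners agree (B hardcodes the default max_length = 100)
theorem clean_eq (v : Option String) : clean_B v = clean_to_single_line v 100 := by
  cases v with
  | none => rfl
  | some s =>
    have h973 : (100:Int) - 3 = 97 := by norm_num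
    unfold clean_B clean_to_single_line
    rw [h973]

-- scanning a reversed-and-extended list: first check the old part, then the new line
theorem lastValue_append (key : String) (xs ys : List String) :
    lastValue_B key (xs ++ ys)
      = match lastValue_B key xs with
        | some v => some v
        | none => lastValue_B key ys := by
  induction xs with
  | nil => simp [lastValue_B]
  | cons x xs ih =>
    simp only [List.cons_append, lastValue_B]
    cases matchLine_B key x <;> simp [ih]

-- one step of A's fold, read at a fixed target key, is B's single-line match
theorem step_getD (target_keys : List String) (k : String) (hk : target_keys.contains k = true)
    (d : PySem.Dict String (Option String)) (line : String) :
    (specStep_A target_keys d line).getD k none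
      = match matchLine_B k line with
        | some v => clean_to_single_line (some v) 100
        | none => d.getD k none := by
  unfold specStep_A parse_line_to_pair matchLine_B
  cases hin : PySem.Str.isIn ":" line with
  | false => simp
  | true =>
    rcases hsp : (PySem.Str.splitMax? line ":" 1).getD [] with _ | ⟨a, _ | ⟨b, _ | _⟩⟩
    · simp
    · simp
    · by_cases he : PySem.Str.strip a = k
      · subst he
        simp only [Bool.true_eq_false, if_false, hk, ite_true]
        rw [PySem.Dict.getD_insert]
        simp
      · cases hc : target_keys.contains (PySem.Str.strip a) with
        | true =>
          simp only [Bool.true_eq_false, if_false, hc, ite_true]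
          rw [PySem.Dict.getD_insert]
          simp [he, Ne.symm he]
        | false =>
          have hm : PySem.Str.strip a ∉ target_keys := by simpa using hc
          simp [hm, he]
    · simp

-- A's whole fold, read at a target key, equals B's reverse scan over the same lines
theorem fold_getD (target_keys : List String) (k : String) (hk : target_keys.contains k = true) :
    ∀ (lines : List String) (d : PySem.Dict String (Option String)),
    (lines.foldl (specStep_A target_keys) d).getD k none
      = match lastValue_B k lines.reverse with
        | some v => clean_to_single_line (some v) 100
        | none => d.getD k none := by
  intro lines
  induction lines with
  | nil => intro d; simp [lastValue_B]
  | cons line rest ih =>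
    intro d
    simp only [List.foldl_cons, List.reverse_cons]
    rw [ih, lastValue_append]
    cases lastValue_B k rest.reverse with
    | some v => rfl
    | none =>
      simp only [lastValue_B]
      rw [step_getD target_keys k hk]
      cases matchLine_B k line <;> rfl

-- A's loop only ever overwrites keys that are already present, so the key list is stable
theorem fold_keys (target_keys : List String) :
    ∀ (lines : List String) (d : PySem.Dict String (Option String)),
    (∀ x, target_keys.contains x = true → d.contains x = true) →
    (lines.foldl (specStep_A target_keys) d).keys = d.keys := by
  intro lines
  induction lines with
  | nil => intro d _; rfl
  | cons line rest ih =>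
    intro d hd
    simp only [List.foldl_cons]
    have hstep : (specStep_A target_keys d line).keys = d.keys := by
      cases hpl : (parse_line_to_pair line).1 with
      | none => simp [specStep_A, hpl]
      | some key =>
        by_cases hm : key ∈ target_keys
        · have hc : target_keys.contains key = true := by simpa using hm
          simp only [specStep_A, hpl, hc, ite_true]
          exact PySem.Dict.keys_insert_of_contains d _ (hd key hc)
        · simp [specStep_A, hpl, hm]
    rw [ih _ (fun x hx => ?_), hstep]
    rw [PySem.Dict.contains_iff_mem_keys, hstep, ← PySem.Dict.contains_iff_mem_keys]
    exact hd x hx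

-- the initial dict {key: None for key in target_keys}
theorem init_keys (target_keys : List String) :
    (target_keys.foldl (fun d key => d.insert key none) (PySem.Dict.empty : PySem.Dict String (Option String))).keys
      = PySem.List.dedup target_keys := by
  have := PySem.Dict.keys_foldl_insert target_keys
    (fun _ _ => (none : Option String)) PySem.Dict.empty
  simpa using this

theorem init_getD (target_keys : List String) (k : String) :
    ∀ (d : PySem.Dict String (Option String)), d.getD k none = none →
    (target_keys.foldl (fun d key => d.insert key none) d).getD k none = none := by
  induction target_keys with
  | nil => intro d h; simpa using h
  | cons t rest ih =>
    intro d h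
    simp only [List.foldl_cons]
    apply ih
    rw [PySem.Dict.getD_insert]
    split <;> simp [h]

theorem extract_selected_specs_spec : Claim_equal_extract_selected_specs := by
  intro record target_keys _
  unfold Spec_extract_selected_specs extract_selected_specs extract_selected_specs_alt
  rw [raw_eq]
  set lines := rawLines_B record with hlines
  set init : PySem.Dict String (Option String) :=
    target_keys.foldl (fun d key => d.insert key none) PySem.Dict.empty with hinit
  set D := lines.foldl (specStep_A target_keys) init with hD
  have hik : init.keys = PySem.List.dedup target_keys := init_keys target_keys
  have hkeys : D.keys = PySem.List.dedup target_keys := by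
    rw [hD, fold_keys target_keys lines init (fun x hx => ?_), hik]
    rw [PySem.Dict.contains_iff_mem_keys, hik, PySem.List.mem_dedup]
    exact (List.contains_iff_mem).mp hx
  have hnd : D.keys.Nodup := by rw [hkeys]; exact PySem.List.nodup_dedup target_keys
  rw [PySem.Dict.items_eq_map_keys D hnd none, hkeys]
  apply List.map_congr_left
  intro k hkmem
  have hk : target_keys.contains k = true := by
    rw [List.contains_iff_mem]
    exact (PySem.List.mem_dedup target_keys k).mp hkmem
  have hbase : init.getD k none = none := by
    rw [hinit, init_getD target_keys k PySem.Dict.empty (PySem.Dict.getD_empty k none)]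
  rw [hD, fold_getD target_keys k hk lines init, hbase, clean_eq]
  cases lastValue_B k lines.reverse <;> rfl
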